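-- pv_equiv track=rewrite | github.com/NextCNS/piqmc-chainstrength | GAC_algorithm.py | first_and_last_occurrence
-- ===== SOURCE A (Python) =====
-- def first_and_last_occurrence(target_value, input_dict):
--     first_occurrence = None
--     last_occurrence = None
--
--     for key, value in input_dict.items():
--         if value == target_value:
--             if first_occurrence is None:
--                 first_occurrence = key
--             last_occurrence = key
--
--     return first_occurrence, last_occurrence
-- ===== SOURCE B (Python) =====
-- def first_and_last_occurrence(target_value, input_dict):
--     # Two early-terminating directional searches instead of one full
--     # accumulating scan: first match scanning forward, last match by
--     # scanning the items backwards.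
--     items = list(input_dict.items())
--     first = next((k for k, v in items if v == target_value), None)
--     if first is None:
--         return None, None
--     last = next((k for k, v in reversed(items) if v == target_value), None)
--     return first, last
-- ===== Notes on version B (the rewrite author's own statement) =====
-- stated objective: alternative
-- what changed: Replaces A's single full pass maintaining first/last sentinel variables with two early-terminating directional searches: the first match is found scanning forward and the last match by scanning the items in reverse, each stopping at the first hit.
import Mathlib
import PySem

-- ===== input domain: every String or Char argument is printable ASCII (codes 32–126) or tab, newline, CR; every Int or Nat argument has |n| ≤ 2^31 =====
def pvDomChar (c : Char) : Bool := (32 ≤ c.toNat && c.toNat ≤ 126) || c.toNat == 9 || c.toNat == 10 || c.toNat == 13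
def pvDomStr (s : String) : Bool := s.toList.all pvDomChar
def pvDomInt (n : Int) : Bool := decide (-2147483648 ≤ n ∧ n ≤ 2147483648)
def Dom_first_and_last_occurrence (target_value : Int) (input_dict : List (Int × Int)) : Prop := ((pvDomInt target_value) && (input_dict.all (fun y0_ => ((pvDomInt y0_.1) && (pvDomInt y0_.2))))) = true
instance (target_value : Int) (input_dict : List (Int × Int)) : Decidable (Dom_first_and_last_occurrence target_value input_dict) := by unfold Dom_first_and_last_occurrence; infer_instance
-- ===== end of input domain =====

-- ===== PORT A =====
-- A: one full pass, sentinel variables first/last updated as the scan runs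
def first_and_last_occurrence (target_value : Int) (input_dict : List (Int × Int)) : Option Int × Option Int :=
  input_dict.foldl
    (fun st kv =>
      if kv.2 = target_value then
        ((if st.1 = none then some kv.1 else st.1), some kv.1)
      else st)
    (none, none)

-- ===== PORT B =====
-- B: two early-terminating directional searches — find first forward, find last scanning the reversed list
def first_and_last_occurrence_alt (target_value : Int) (input_dict : List (Int × Int)) : Option Int × Option Int :=
  match input_dict.find? (fun kv => kv.2 == target_value) with
  | none => (none, none)
  | some kv =>
      (some kv.1,
       (input_dict.reverse.find? (fun kv => kv.2 == target_value)).map Prod.fst)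

-- ===== PRECONDITION & SPEC =====
def Spec_first_and_last_occurrence (target_value : Int) (input_dict : List (Int × Int)) (out : Option Int × Option Int) : Prop := out = first_and_last_occurrence_alt target_value input_dict
instance (target_value : Int) (input_dict : List (Int × Int)) (out : Option Int × Option Int) : Decidable (Spec_first_and_last_occurrence target_value input_dict out) := by unfold Spec_first_and_last_occurrence; infer_instance

-- ===== CLAIM (what is proved, stated in full; the proofs are below) =====
def Claim_equal_first_and_last_occurrence : Prop := ∀ (target_value : Int) (input_dict : List (Int × Int)), Dom_first_and_last_occurrence target_value input_dict → Spec_first_and_last_occurrence target_value input_dict (first_and_last_occurrence target_value input_dict)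

-- ===== LEMMAS AND PROOFS =====

-- A's fold, from an arbitrary state, in terms of directional searches.
lemma fal_loop (t : Int) (d : List (Int × Int)) (a b : Option Int) :
    d.foldl
      (fun st kv =>
        if kv.2 = t then
          ((if st.1 = none then some kv.1 else st.1), some kv.1)
        else st)
      (a, b)
    = (a.or ((d.find? (fun kv => kv.2 == t)).map Prod.fst),
       ((d.reverse.find? (fun kv => kv.2 == t)).map Prod.fst).or b) := by
  induction d generalizing a b with
  | nil => simp
  | cons kv rest ih =>
    by_cases h : kv.2 = t
    · simp only [List.foldl_cons, List.find?_cons, h, beq_self_eq_true,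
        List.reverse_cons]
      rw [ih]
      rw [Prod.mk.injEq]
      constructor
      · cases a <;> simp
      · rw [List.find?_append]
        cases hg : rest.reverse.find? (fun kv => kv.2 == t) with
        | none => simp [h]
        | some y => simp
    · have hb : (kv.2 == t) = false := by simp [h]
      simp only [List.foldl_cons, if_neg h, List.find?_cons, hb, List.reverse_cons]
      rw [ih, List.find?_append]
      simp [hb]

-- ===== VERDICT (by name: the statement is the Claim_ definition above) =====
theorem first_and_last_occurrence_spec : Claim_equal_first_and_last_occurrence := by
  intro t d _
  unfold Spec_first_and_last_occurrence first_and_last_occurrence first_and_last_occurrence_alt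
  rw [fal_loop]
  cases hf : d.find? (fun kv => kv.2 == t) with
  | none =>
    have : d.reverse.find? (fun kv => kv.2 == t) = none := by
      rw [List.find?_eq_none] at hf ⊢
      intro x hx; exact hf x (List.mem_reverse.mp hx)
    simp [this]
  | some kv => simp
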